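-- pv_equiv track=rewrite | github.com/abdulsalamtoyin/breeding_dashboard | utils/enhanced_rag_system.py | _expand_breeding_terms
-- ===== SOURCE A (Python) =====
-- def _expand_breeding_terms(query: str) -> str:
--     """Expand breeding-specific abbreviations and terms"""
--
--     expansions = {
--         "GxE": "genotype by environment interaction",
--         "GEBV": "genomic estimated breeding value",
--         "QTL": "quantitative trait loci",
--         "SNP": "single nucleotide polymorphism",
--         "BLUE": "best linear unbiased estimate"
--     }
--
--     expanded = query
--     for abbrev, full_term in expansions.items():
--         expanded = expanded.replace(abbrev, f"{abbrev} {full_term}")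
--
--     return expanded
-- ===== SOURCE B (Python) =====
-- def _expand_breeding_terms(query: str) -> str:
--     """Expand breeding-specific abbreviations and terms in one left-to-right pass."""
--
--     expansions = {
--         "GxE": "genotype by environment interaction",
--         "GEBV": "genomic estimated breeding value",
--         "QTL": "quantitative trait loci",
--         "SNP": "single nucleotide polymorphism",
--         "BLUE": "best linear unbiased estimate"
--     }
--
--     out = []
--     i = 0
--     n = len(query)
--     while i < n:
--         for abbrev, full_term in expansions.items():
--             if query.startswith(abbrev, i):
--                 out.append(f"{abbrev} {full_term}")
--                 i += len(abbrev)
--                 break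
--         else:
--             out.append(query[i])
--             i += 1
--     return "".join(out)
-- ===== Notes on version B (the rewrite author's own statement) =====
-- stated objective: alternative
-- what changed: A rewrites the whole string once per abbreviation (five sequential str.replace passes); B makes a single left-to-right scan that at each position tries the abbreviations in dict order and emits the expansion on a match, which is equivalent because the five abbreviations cannot overlap each other and no expansion text re-creates a later abbreviation.
import Mathlib
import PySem

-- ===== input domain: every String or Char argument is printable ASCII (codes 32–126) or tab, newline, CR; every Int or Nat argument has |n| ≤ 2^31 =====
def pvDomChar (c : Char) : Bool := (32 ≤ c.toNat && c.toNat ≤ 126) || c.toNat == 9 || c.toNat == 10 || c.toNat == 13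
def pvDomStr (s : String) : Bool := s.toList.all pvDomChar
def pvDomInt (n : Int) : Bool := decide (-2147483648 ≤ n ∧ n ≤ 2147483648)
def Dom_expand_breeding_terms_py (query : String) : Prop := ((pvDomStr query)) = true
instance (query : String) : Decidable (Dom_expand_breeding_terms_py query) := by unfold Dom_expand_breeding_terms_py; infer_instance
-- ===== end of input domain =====

-- B replaces A's five sequential full-string .replace passes by ONE left-to-right scan that at
-- each position tries the abbreviations in dict order (objective: alternative single-pass algorithm).

-- ===== PORT A =====
-- literal transliteration: the dict literal, then a for-loop of str.replace passes
def expand_breeding_terms_py (query : String) : String :=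
  let expansions : PySem.Dict String String := PySem.Dict.mk
    [("GxE", "genotype by environment interaction"),
     ("GEBV", "genomic estimated breeding value"),
     ("QTL", "quantitative trait loci"),
     ("SNP", "single nucleotide polymorphism"),
     ("BLUE", "best linear unbiased estimate")]
  expansions.items.foldl
    (fun expanded p => PySem.Str.replace expanded p.1 (p.1 ++ " " ++ p.2)) query

-- ===== PORT B =====
-- Source B's (abbrev, f"{abbrev} {full_term}") pieces, in dict order
def pvPairsB : List (List Char × List Char) :=
  [("GxE".toList, "GxE genotype by environment interaction".toList),
   ("GEBV".toList, "GEBV genomic estimated breeding value".toList),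
   ("QTL".toList, "QTL quantitative trait loci".toList),
   ("SNP".toList, "SNP single nucleotide polymorphism".toList),
   ("BLUE".toList, "BLUE best linear unbiased estimate".toList)]

-- the inner 'for abbrev, full_term in expansions.items(): if query.startswith(abbrev, i): … break / else: …' of Source B
def pvFindMatchB : List (List Char × List Char) → List Char → Option (List Char × List Char)
  | [], _ => none
  | (k, r) :: rest, l => if k.isPrefixOf l then some (k, r) else pvFindMatchB rest l

-- the 'while i < n' scan of Source B, hand-ported (exact: startswith at i = isPrefixOf of the suffix,
-- i += len(abbrev) = dropping the matched abbreviation; ''.join of the pieces = concatenation)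
def pvScanB : List Char → List Char
  | [] => []
  | c :: t =>
    match pvFindMatchB pvPairsB (c :: t) with
    | some (k, r) => r ++ pvScanB (t.drop (k.length - 1))
    | none => c :: pvScanB t
termination_by l => l.length
decreasing_by
  · simp
  · simp

def expand_breeding_terms_py_alt (query : String) : String :=
  String.ofList (pvScanB query.toList)

-- ===== PRECONDITION & SPEC =====
def Spec_expand_breeding_terms_py (query : String) (out : String) : Prop := out = expand_breeding_terms_py_alt query
instance (query : String) (out : String) : Decidable (Spec_expand_breeding_terms_py query out) := by unfold Spec_expand_breeding_terms_py; infer_instance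

-- ===== CLAIM (what is proved, stated in full; the proofs are below) =====
def Claim_equal_expand_breeding_terms_py : Prop := ∀ (query : String), Dom_expand_breeding_terms_py query → Spec_expand_breeding_terms_py query (expand_breeding_terms_py query)

-- ===== LEMMAS AND PROOFS =====

-- proof-side names for the five abbreviations and their replacement strings
def pvK1 : List Char := ['G','x','E']
def pvK2 : List Char := ['G','E','B','V']
def pvK3 : List Char := ['Q','T','L']
def pvK4 : List Char := ['S','N','P']
def pvK5 : List Char := ['B','L','U','E']
def pvR1 : List Char := "GxE genotype by environment interaction".toList
def pvR2 : List Char := "GEBV genomic estimated breeding value".toList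
def pvR3 : List Char := "QTL quantitative trait loci".toList
def pvR4 : List Char := "SNP single nucleotide polymorphism".toList
def pvR5 : List Char := "BLUE best linear unbiased estimate".toList

-- structural characterisation of one str.replace pass (for a nonempty pattern)
def pvReplOne (k R : List Char) : List Char → List Char
  | [] => []
  | c :: t =>
    if k.isPrefixOf (c :: t) then R ++ pvReplOne k R (t.drop (k.length - 1))
    else c :: pvReplOne k R t
termination_by l => l.length
decreasing_by
  · simp
  · simp

theorem pvGo_eq (k R : List Char) (hk : k ≠ []) :
    ∀ (fuel : Nat) (l acc : List Char), l.length ≤ fuel →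
      PySem.Chars.replace.go k R fuel l acc = acc.reverse ++ pvReplOne k R l := by
  intro fuel
  induction fuel with
  | zero =>
    intro l acc h
    have hl : l = [] := by cases l <;> simp_all
    subst hl
    simp [PySem.Chars.replace.go, pvReplOne]
  | succ n ih =>
    intro l acc h
    cases l with
    | nil => simp [PySem.Chars.replace.go, pvReplOne]
    | cons c t =>
      obtain ⟨kh, kt, rfl⟩ : ∃ kh kt, k = kh :: kt := by
        cases k with
        | nil => exact absurd rfl hk
        | cons a b => exact ⟨a, b, rfl⟩
      rw [show PySem.Chars.replace.go (kh::kt) R (n+1) (c::t) acc =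
        if (kh::kt).isPrefixOf (c::t) then
          PySem.Chars.replace.go (kh::kt) R n (List.drop (kh::kt).length (c::t)) (R.reverse ++ acc)
        else PySem.Chars.replace.go (kh::kt) R n t (c :: acc) from rfl]
      by_cases hp : (kh::kt).isPrefixOf (c::t)
      · rw [if_pos hp]
        rw [ih _ _ (by simp at h ⊢; omega)]
        rw [pvReplOne, if_pos hp]
        simp
      · rw [if_neg hp]
        rw [ih _ _ (by simp at h ⊢; omega)]
        rw [pvReplOne, if_neg hp]
        simp

theorem pvReplace_eq (k R l : List Char) (hk : k ≠ []) :
    PySem.Chars.replace l k R = pvReplOne k R l := by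
  rw [PySem.Chars.replace, if_neg (by simpa using hk)]
  simpa using pvGo_eq k R hk l.length l [] le_rfl

-- one pass distributes over a prefix S inside which the pattern cannot start
theorem pvReplOne_append (k R S : List Char)
    (h : ∀ i < S.length, ¬ (k <+: S.drop i) ∧ ¬ (S.drop i <+: k)) :
    ∀ x, pvReplOne k R (S ++ x) = S ++ pvReplOne k R x := by
  induction S with
  | nil => intro x; simp
  | cons c S' ih =>
    intro x
    have h0 := h 0 (by simp)
    have hnp : ¬ k.isPrefixOf (c :: (S' ++ x)) = true := by
      rw [List.isPrefixOf_iff_prefix]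
      intro hpre
      rcases List.prefix_or_prefix_of_prefix hpre
        (show (c :: S') <+: (c :: S') ++ x from ⟨x, rfl⟩) with h1 | h1
      · exact h0.1 h1
      · exact h0.2 h1
    rw [show (c :: S') ++ x = c :: (S' ++ x) from rfl, pvReplOne, if_neg hnp]
    rw [ih (fun i hi => by simpa using h (i+1) (by simpa using hi))]
    rfl

theorem pvReplOne_eat (k R : List Char) (hk : k ≠ []) (x : List Char) :
    pvReplOne k R (k ++ x) = R ++ pvReplOne k R x := by
  obtain ⟨kh, kt, rfl⟩ : ∃ kh kt, k = kh :: kt := by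
    cases k with
    | nil => exact absurd rfl hk
    | cons a b => exact ⟨a, b, rfl⟩
  rw [show (kh :: kt) ++ x = kh :: (kt ++ x) from rfl, pvReplOne,
    if_pos (List.isPrefixOf_iff_prefix.mpr ⟨x, by simp⟩)]
  simp

theorem pvReplOne_cons_of_not_prefix (k R : List Char) (c : Char) (t : List Char)
    (h : ¬ k <+: c :: t) : pvReplOne k R (c :: t) = c :: pvReplOne k R t := by
  rw [pvReplOne, if_neg (by rw [List.isPrefixOf_iff_prefix]; exact h)]

-- a pass whose pattern and replacement start with kh preserves prefixes avoiding kh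
theorem pvReplOne_prefix_iff (k R p : List Char) (kh : Char)
    (hK : k.head? = some kh) (hR : R.head? = some kh) (hp : ∀ c ∈ p, c ≠ kh) :
    ∀ y, (p <+: pvReplOne k R y ↔ p <+: y) := by
  obtain ⟨kt, rfl⟩ : ∃ kt, k = kh :: kt := by
    cases k with
    | nil => simp at hK
    | cons a b => simp at hK; exact ⟨b, by rw [hK]⟩
  obtain ⟨Rt, rfl⟩ : ∃ Rt, R = kh :: Rt := by
    cases R with
    | nil => simp at hR
    | cons a b => simp at hR; exact ⟨b, by rw [hR]⟩
  induction p with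
  | nil => intro y; simp
  | cons a p' ih =>
    have ha : a ≠ kh := hp a (by simp)
    have hp' : ∀ c ∈ p', c ≠ kh := fun c hc => hp c (by simp [hc])
    intro y
    induction y using pvReplOne.induct (k := kh :: kt) with
    | case1 => simp [pvReplOne]
    | case2 c t hpre ih2 =>
      rw [pvReplOne, if_pos hpre]
      have hy : c = kh := by
        rcases List.isPrefixOf_iff_prefix.mp hpre with ⟨s, hs⟩
        simpa using congrArg List.head? hs.symm
      constructor
      · intro hcontra
        rcases hcontra with ⟨s, hs⟩
        have : kh = a := by simpa using congrArg List.head? hs.symm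
        exact absurd this.symm ha
      · intro hcontra
        rcases hcontra with ⟨s, hs⟩
        have : c = a := by simpa using congrArg List.head? hs.symm
        exact absurd (this.symm.trans hy) ha
    | case3 c t hpre ih2 =>
      rw [pvReplOne, if_neg hpre]
      rw [List.cons_prefix_cons, List.cons_prefix_cons]
      exact and_congr_right fun _ => ih hp' t

-- an earlier pass cannot create a new occurrence of a later abbreviation at the head
theorem pvNotPrefix_replOne (kh : Char) (kt : List Char) (k' R' : List Char) (jh : Char)
    (hK' : k'.head? = some jh) (hR' : R'.head? = some jh) (hp : ∀ c ∈ kt, c ≠ jh)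
    (c : Char) (t : List Char) (h : ¬ (kh :: kt) <+: c :: t) :
    ¬ (kh :: kt) <+: c :: pvReplOne k' R' t := by
  intro hc
  rw [List.cons_prefix_cons] at hc
  exact h (List.cons_prefix_cons.mpr
    ⟨hc.1, (pvReplOne_prefix_iff k' R' kt jh hK' hR' hp t).mp hc.2⟩)

-- scanner steps
theorem pvScan1 (rest : List Char) : pvScanB (pvK1 ++ rest) = pvR1 ++ pvScanB rest := by
  rw [show pvK1 ++ rest = 'G'::'x'::'E'::rest from rfl, pvScanB]
  have hm : pvFindMatchB pvPairsB ('G'::'x'::'E'::rest) = some (pvK1, pvR1) := by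
    rw [pvPairsB, pvFindMatchB, if_pos (by simp [List.isPrefixOf])]
    rfl
  rw [hm]
  norm_num [pvK1]

theorem pvScan2 (rest : List Char) : pvScanB (pvK2 ++ rest) = pvR2 ++ pvScanB rest := by
  rw [show pvK2 ++ rest = 'G'::'E'::'B'::'V'::rest from rfl, pvScanB]
  have hm : pvFindMatchB pvPairsB ('G'::'E'::'B'::'V'::rest) = some (pvK2, pvR2) := by
    rw [pvPairsB, pvFindMatchB, if_neg (by simp [List.isPrefixOf]), pvFindMatchB,
      if_pos (by simp [List.isPrefixOf])]
    rfl
  rw [hm]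
  norm_num [pvK2]

theorem pvScan3 (rest : List Char) : pvScanB (pvK3 ++ rest) = pvR3 ++ pvScanB rest := by
  rw [show pvK3 ++ rest = 'Q'::'T'::'L'::rest from rfl, pvScanB]
  have hm : pvFindMatchB pvPairsB ('Q'::'T'::'L'::rest) = some (pvK3, pvR3) := by
    rw [pvPairsB, pvFindMatchB, if_neg (by simp [List.isPrefixOf]), pvFindMatchB,
      if_neg (by simp [List.isPrefixOf]), pvFindMatchB, if_pos (by simp [List.isPrefixOf])]
    rfl
  rw [hm]
  norm_num [pvK3]

theorem pvScan4 (rest : List Char) : pvScanB (pvK4 ++ rest) = pvR4 ++ pvScanB rest := by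
  rw [show pvK4 ++ rest = 'S'::'N'::'P'::rest from rfl, pvScanB]
  have hm : pvFindMatchB pvPairsB ('S'::'N'::'P'::rest) = some (pvK4, pvR4) := by
    rw [pvPairsB, pvFindMatchB, if_neg (by simp [List.isPrefixOf]), pvFindMatchB,
      if_neg (by simp [List.isPrefixOf]), pvFindMatchB, if_neg (by simp [List.isPrefixOf]),
      pvFindMatchB, if_pos (by simp [List.isPrefixOf])]
    rfl
  rw [hm]
  norm_num [pvK4]

theorem pvScan5 (rest : List Char) : pvScanB (pvK5 ++ rest) = pvR5 ++ pvScanB rest := by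
  rw [show pvK5 ++ rest = 'B'::'L'::'U'::'E'::rest from rfl, pvScanB]
  have hm : pvFindMatchB pvPairsB ('B'::'L'::'U'::'E'::rest) = some (pvK5, pvR5) := by
    rw [pvPairsB, pvFindMatchB, if_neg (by simp [List.isPrefixOf]), pvFindMatchB,
      if_neg (by simp [List.isPrefixOf]), pvFindMatchB, if_neg (by simp [List.isPrefixOf]),
      pvFindMatchB, if_neg (by simp [List.isPrefixOf]), pvFindMatchB,
      if_pos (by simp [List.isPrefixOf])]
    rfl
  rw [hm]
  norm_num [pvK5]

theorem pvScanNone (c : Char) (t : List Char)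
    (h1 : ¬ pvK1 <+: c :: t) (h2 : ¬ pvK2 <+: c :: t) (h3 : ¬ pvK3 <+: c :: t)
    (h4 : ¬ pvK4 <+: c :: t) (h5 : ¬ pvK5 <+: c :: t) :
    pvScanB (c :: t) = c :: pvScanB t := by
  rw [pvScanB]
  have hm : pvFindMatchB pvPairsB (c :: t) = none := by
    rw [pvPairsB, pvFindMatchB,
      if_neg (by rw [show "GxE".toList = pvK1 from rfl, List.isPrefixOf_iff_prefix]; exact h1),
      pvFindMatchB,
      if_neg (by rw [show "GEBV".toList = pvK2 from rfl, List.isPrefixOf_iff_prefix]; exact h2),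
      pvFindMatchB,
      if_neg (by rw [show "QTL".toList = pvK3 from rfl, List.isPrefixOf_iff_prefix]; exact h3),
      pvFindMatchB,
      if_neg (by rw [show "SNP".toList = pvK4 from rfl, List.isPrefixOf_iff_prefix]; exact h4),
      pvFindMatchB,
      if_neg (by rw [show "BLUE".toList = pvK5 from rfl, List.isPrefixOf_iff_prefix]; exact h5),
      pvFindMatchB]
  rw [hm]

-- the composition of the five passes, innermost first
def pvF (l : List Char) : List Char :=
  pvReplOne pvK5 pvR5 (pvReplOne pvK4 pvR4 (pvReplOne pvK3 pvR3
    (pvReplOne pvK2 pvR2 (pvReplOne pvK1 pvR1 l))))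

set_option maxRecDepth 8192 in
theorem pvMain : ∀ l : List Char, pvF l = pvScanB l := by
  have key : ∀ n (l : List Char), l.length ≤ n → pvF l = pvScanB l := by
    intro n
    induction n with
    | zero =>
      intro l h
      have hl : l = [] := by cases l <;> simp_all
      subst hl
      simp [pvF, pvReplOne, pvScanB]
    | succ n ih =>
      intro l hlen
      cases l with
      | nil => simp [pvF, pvReplOne, pvScanB]
      | cons c t =>
        by_cases h1 : pvK1 <+: c :: t
        · obtain ⟨rest, hr⟩ := h1
          rw [← hr]
          have hL : rest.length ≤ n := by
            have := congrArg List.length hr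
            simp [pvK1] at this hlen
            omega
          rw [pvScan1]
          unfold pvF
          rw [pvReplOne_eat pvK1 pvR1 (by simp [pvK1]),
            pvReplOne_append pvK2 pvR2 pvR1 (by decide),
            pvReplOne_append pvK3 pvR3 pvR1 (by decide),
            pvReplOne_append pvK4 pvR4 pvR1 (by decide),
            pvReplOne_append pvK5 pvR5 pvR1 (by decide)]
          exact congrArg _ (ih rest hL)
        · by_cases h2 : pvK2 <+: c :: t
          · obtain ⟨rest, hr⟩ := h2
            rw [← hr]
            have hL : rest.length ≤ n := by
              have := congrArg List.length hr
              simp [pvK2] at this hlen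
              omega
            rw [pvScan2]
            unfold pvF
            rw [pvReplOne_append pvK1 pvR1 pvK2 (by decide),
              pvReplOne_eat pvK2 pvR2 (by simp [pvK2]),
              pvReplOne_append pvK3 pvR3 pvR2 (by decide),
              pvReplOne_append pvK4 pvR4 pvR2 (by decide),
              pvReplOne_append pvK5 pvR5 pvR2 (by decide)]
            exact congrArg _ (ih rest hL)
          · by_cases h3 : pvK3 <+: c :: t
            · obtain ⟨rest, hr⟩ := h3
              rw [← hr]
              have hL : rest.length ≤ n := by
                have := congrArg List.length hr
                simp [pvK3] at this hlen
                omega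
              rw [pvScan3]
              unfold pvF
              rw [pvReplOne_append pvK1 pvR1 pvK3 (by decide),
                pvReplOne_append pvK2 pvR2 pvK3 (by decide),
                pvReplOne_eat pvK3 pvR3 (by simp [pvK3]),
                pvReplOne_append pvK4 pvR4 pvR3 (by decide),
                pvReplOne_append pvK5 pvR5 pvR3 (by decide)]
              exact congrArg _ (ih rest hL)
            · by_cases h4 : pvK4 <+: c :: t
              · obtain ⟨rest, hr⟩ := h4
                rw [← hr]
                have hL : rest.length ≤ n := by
                  have := congrArg List.length hr
                  simp [pvK4] at this hlen
                  omega
                rw [pvScan4]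
                unfold pvF
                rw [pvReplOne_append pvK1 pvR1 pvK4 (by decide),
                  pvReplOne_append pvK2 pvR2 pvK4 (by decide),
                  pvReplOne_append pvK3 pvR3 pvK4 (by decide),
                  pvReplOne_eat pvK4 pvR4 (by simp [pvK4]),
                  pvReplOne_append pvK5 pvR5 pvR4 (by decide)]
                exact congrArg _ (ih rest hL)
              · by_cases h5 : pvK5 <+: c :: t
                · obtain ⟨rest, hr⟩ := h5
                  rw [← hr]
                  have hL : rest.length ≤ n := by
                    have := congrArg List.length hr
                    simp [pvK5] at this hlen
                    omega
                  rw [pvScan5]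
                  unfold pvF
                  rw [pvReplOne_append pvK1 pvR1 pvK5 (by decide),
                    pvReplOne_append pvK2 pvR2 pvK5 (by decide),
                    pvReplOne_append pvK3 pvR3 pvK5 (by decide),
                    pvReplOne_append pvK4 pvR4 pvK5 (by decide),
                    pvReplOne_eat pvK5 pvR5 (by simp [pvK5])]
                  exact congrArg _ (ih rest hL)
                · -- no abbreviation matches at the head
                  have hT : t.length ≤ n := by simp at hlen; omega
                  rw [pvScanNone c t h1 h2 h3 h4 h5]
                  unfold pvF
                  have a1 := pvReplOne_cons_of_not_prefix pvK1 pvR1 c t h1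
                  rw [a1]
                  have n2 := pvNotPrefix_replOne 'G' ['E','B','V'] pvK1 pvR1 'G'
                    rfl rfl (by simp) c t h2
                  have a2 := pvReplOne_cons_of_not_prefix pvK2 pvR2 c _ n2
                  rw [a2]
                  have n3a := pvNotPrefix_replOne 'Q' ['T','L'] pvK1 pvR1 'G'
                    rfl rfl (by simp) c t h3
                  have n3 := pvNotPrefix_replOne 'Q' ['T','L'] pvK2 pvR2 'G'
                    rfl rfl (by simp) c _ n3a
                  have a3 := pvReplOne_cons_of_not_prefix pvK3 pvR3 c _ n3
                  rw [a3]
                  have n4a := pvNotPrefix_replOne 'S' ['N','P'] pvK1 pvR1 'G'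
                    rfl rfl (by simp) c t h4
                  have n4b := pvNotPrefix_replOne 'S' ['N','P'] pvK2 pvR2 'G'
                    rfl rfl (by simp) c _ n4a
                  have n4 := pvNotPrefix_replOne 'S' ['N','P'] pvK3 pvR3 'Q'
                    rfl rfl (by simp) c _ n4b
                  have a4 := pvReplOne_cons_of_not_prefix pvK4 pvR4 c _ n4
                  rw [a4]
                  have n5a := pvNotPrefix_replOne 'B' ['L','U','E'] pvK1 pvR1 'G'
                    rfl rfl (by simp) c t h5
                  have n5b := pvNotPrefix_replOne 'B' ['L','U','E'] pvK2 pvR2 'G'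
                    rfl rfl (by simp) c _ n5a
                  have n5c := pvNotPrefix_replOne 'B' ['L','U','E'] pvK3 pvR3 'Q'
                    rfl rfl (by simp) c _ n5b
                  have n5 := pvNotPrefix_replOne 'B' ['L','U','E'] pvK4 pvR4 'S'
                    rfl rfl (by simp) c _ n5c
                  have a5 := pvReplOne_cons_of_not_prefix pvK5 pvR5 c _ n5
                  rw [a5]
                  exact congrArg _ (ih t hT)
  exact fun l => key l.length l le_rfl

-- port A unfolded to the five structural passes
set_option maxRecDepth 8192 in
theorem pvPortA_eq (q : String) : expand_breeding_terms_py q = String.ofList (pvF q.toList) := by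
  unfold expand_breeding_terms_py pvF
  simp only [List.foldl, PySem.Str.replace, String.toList_ofList]
  rw [show ("GxE" : String).toList = pvK1 from rfl,
    show ("GxE" ++ " " ++ "genotype by environment interaction" : String).toList = pvR1 from by decide,
    show ("GEBV" : String).toList = pvK2 from rfl,
    show ("GEBV" ++ " " ++ "genomic estimated breeding value" : String).toList = pvR2 from by decide,
    show ("QTL" : String).toList = pvK3 from rfl,
    show ("QTL" ++ " " ++ "quantitative trait loci" : String).toList = pvR3 from by decide,
    show ("SNP" : String).toList = pvK4 from rfl,
    show ("SNP" ++ " " ++ "single nucleotide polymorphism" : String).toList = pvR4 from by decide,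
    show ("BLUE" : String).toList = pvK5 from rfl,
    show ("BLUE" ++ " " ++ "best linear unbiased estimate" : String).toList = pvR5 from by decide,
    pvReplace_eq pvK1 pvR1 _ (by simp [pvK1]),
    pvReplace_eq pvK2 pvR2 _ (by simp [pvK2]),
    pvReplace_eq pvK3 pvR3 _ (by simp [pvK3]),
    pvReplace_eq pvK4 pvR4 _ (by simp [pvK4]),
    pvReplace_eq pvK5 pvR5 _ (by simp [pvK5])]

-- ===== VERDICT (by name: the statement is the Claim_ definition above) =====
theorem expand_breeding_terms_py_spec : Claim_equal_expand_breeding_terms_py := by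
  intro q _
  unfold Spec_expand_breeding_terms_py expand_breeding_terms_py_alt
  rw [pvPortA_eq]
  exact congrArg String.ofList (pvMain q.toList)
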